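-- pv_equiv track=rewrite | github.com/elupus/irgen | irgen.py | gen_simplified_from_raw
-- ===== SOURCE A (Python) =====
-- def gen_simplified_from_raw(x):
--     l = 0
--     for i in x:
--         if i == 0:
--             continue
--         elif l == 0:
--             if i > 0:
--                 l = i
--             else:
--                 pass # leading negative
--         elif (l > 0) == (i > 0):
--             l += i
--         else:
--             yield l
--             l = i
--     yield l
-- ===== SOURCE B (Python) =====
-- def gen_simplified_from_raw(x):
--     # filter out zeros, drop the leading negative prefix, then sum consecutive same-sign runs
--     vals = [v for v in x if v != 0]
--     k = 0
--     while k < len(vals) and vals[k] < 0: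
--         k += 1
--     vals = vals[k:]
--     if not vals:
--         yield 0
--         return
--     j = 0
--     while j < len(vals):
--         i = j
--         while i < len(vals) and (vals[i] > 0) == (vals[j] > 0):
--             i += 1
--         yield sum(vals[j:i])
--         j = i
-- ===== Notes on version B (the rewrite author's own statement) =====
-- stated objective: idiomatic
-- what changed: Replaces the single stateful accumulator loop by a three-phase decomposition: filter out zeros, drop the leading negative prefix, then emit the sum of each consecutive same-sign run.
import Mathlib
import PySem

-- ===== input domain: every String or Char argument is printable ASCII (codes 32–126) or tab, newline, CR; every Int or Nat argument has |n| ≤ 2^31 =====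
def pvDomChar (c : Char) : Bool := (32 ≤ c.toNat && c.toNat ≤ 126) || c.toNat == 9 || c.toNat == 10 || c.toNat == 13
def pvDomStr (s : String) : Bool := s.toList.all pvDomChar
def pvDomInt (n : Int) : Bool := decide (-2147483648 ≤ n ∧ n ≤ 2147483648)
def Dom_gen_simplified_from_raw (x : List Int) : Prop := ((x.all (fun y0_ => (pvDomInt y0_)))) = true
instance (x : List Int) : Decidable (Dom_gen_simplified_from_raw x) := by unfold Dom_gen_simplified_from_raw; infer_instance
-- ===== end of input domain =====

-- B replaces A's stateful accumulator loop by filter / drop-leading-negatives / group-and-sum phases (idiomatic decomposition, same cost).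

-- ===== PORT A =====
-- one step of A's for-loop: state = (yielded so far, current accumulator l)
def pvStepA (s : List Int × Int) (i : Int) : List Int × Int :=
  if i = 0 then s
  else if s.2 = 0 then (if i > 0 then (s.1, i) else s)
  else if (decide (s.2 > 0)) = (decide (i > 0)) then (s.1, s.2 + i)
  else (s.1 ++ [s.2], i)

def gen_simplified_from_raw (x : List Int) : List Int :=
  let s := x.foldl pvStepA ([], 0)
  s.1 ++ [s.2]

-- ===== PORT B =====
-- the inner grouping loop of B: sum each maximal run of same-sign values
def pvGroups : List Int → List Int
  | [] => []
  | v :: t =>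
    ((v :: t).takeWhile (fun w => decide (w > 0) == decide (v > 0))).sum ::
      pvGroups ((v :: t).dropWhile (fun w => decide (w > 0) == decide (v > 0)))
termination_by l => l.length
decreasing_by
  rw [List.dropWhile_cons_of_pos (by simp)]
  exact Nat.lt_succ_of_le (List.length_dropWhile_le _ t)

def gen_simplified_from_raw_alt (x : List Int) : List Int :=
  let vals := (x.filter (fun v => decide (v ≠ 0))).dropWhile (fun v => decide (v < 0))
  if vals.isEmpty then [0] else pvGroups vals

-- ===== PRECONDITION & SPEC =====
def Spec_gen_simplified_from_raw (x : List Int) (out : List Int) : Prop := out = gen_simplified_from_raw_alt x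
instance (x : List Int) (out : List Int) : Decidable (Spec_gen_simplified_from_raw x out) := by unfold Spec_gen_simplified_from_raw; infer_instance

-- ===== CLAIM (what is proved, stated in full; the proofs are below) =====
def Claim_equal_gen_simplified_from_raw : Prop := ∀ (x : List Int), Dom_gen_simplified_from_raw x → Spec_gen_simplified_from_raw x (gen_simplified_from_raw x)

-- ===== LEMMAS AND PROOFS =====

-- run A's loop from state (out, l) over the rest of the input, then do the final yield
def pvRunA (out : List Int) (l : Int) (t : List Int) : List Int :=
  let s := t.foldl pvStepA (out, l)
  s.1 ++ [s.2]

theorem pvSign_add (l i : Int) (hl : l ≠ 0) (hi : i ≠ 0)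
    (hs : decide (l > 0) = decide (i > 0)) :
    decide (l + i > 0) = decide (l > 0) ∧ l + i ≠ 0 := by
  rcases lt_trichotomy l 0 with h | h | h
  · rcases lt_trichotomy i 0 with h2 | h2 | h2
    · constructor
      · simp [not_lt.mpr (by omega : l + i ≤ 0), not_lt.mpr (le_of_lt h)]
      · omega
    · exact absurd h2 hi
    · simp [h2, not_lt.mpr (le_of_lt h)] at hs
  · exact absurd h hl
  · rcases lt_trichotomy i 0 with h2 | h2 | h2
    · simp [h, not_lt.mpr (le_of_lt h2)] at hs
    · exact absurd h2 hi
    · exact ⟨by simp [(by omega : l + i > 0), h], by omega⟩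

theorem pvGroups_singleton (l : Int) : pvGroups [l] = [l] := by
  rw [pvGroups]
  simp
  rw [pvGroups]

theorem pvGroups_merge (l i : Int) (t : List Int) (hl : l ≠ 0) (hi : i ≠ 0)
    (hs : decide (l > 0) = decide (i > 0)) :
    pvGroups (l :: i :: t) = pvGroups ((l + i) :: t) := by
  obtain ⟨hsum, -⟩ := pvSign_add l i hl hi hs
  rw [pvGroups, pvGroups]
  simp only [hsum]
  rw [List.takeWhile_cons_of_pos (by simp),
      List.takeWhile_cons_of_pos (by simp only [beq_iff_eq]; exact hs.symm),
      List.takeWhile_cons_of_pos (by simp only [beq_iff_eq]; exact hsum),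
      List.dropWhile_cons_of_pos (by simp),
      List.dropWhile_cons_of_pos (by simp only [beq_iff_eq]; exact hs.symm),
      List.dropWhile_cons_of_pos (by simp only [beq_iff_eq]; exact hsum)]
  simp [add_assoc]

theorem pvGroups_split (l i : Int) (t : List Int)
    (hs : decide (l > 0) ≠ decide (i > 0)) :
    pvGroups (l :: i :: t) = l :: pvGroups (i :: t) := by
  rw [pvGroups]
  rw [List.takeWhile_cons_of_pos (by simp),
      List.takeWhile_cons_of_neg (by simp only [beq_iff_eq]; exact fun h => hs h.symm),
      List.dropWhile_cons_of_pos (by simp),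
      List.dropWhile_cons_of_neg (by simp only [beq_iff_eq]; exact fun h => hs h.symm)]
  simp

theorem pvRunA_pos (t : List Int) : ∀ (out : List Int) (l : Int), l ≠ 0 →
    pvRunA out l t = out ++ pvGroups (l :: t.filter (fun v => decide (v ≠ 0))) := by
  induction t with
  | nil =>
    intro out l hl
    simp [pvRunA, pvGroups_singleton]
  | cons i t ih =>
    intro out l hl
    by_cases hi : i = 0
    · have hstep : pvStepA (out, l) i = (out, l) := by simp [pvStepA, hi]
      simp only [pvRunA, List.foldl_cons, hstep]
      rw [List.filter_cons_of_neg (by simp [hi])]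
      simpa [pvRunA] using ih out l hl
    · rw [List.filter_cons_of_pos (by simp [hi])]
      by_cases hs : decide (l > 0) = decide (i > 0)
      · have hstep : pvStepA (out, l) i = (out, l + i) := by
          simp [pvStepA, hi, hl, hs]
        simp only [pvRunA, List.foldl_cons, hstep]
        obtain ⟨-, hli⟩ := pvSign_add l i hl hi hs
        have htail := ih out (l + i) hli
        simp only [pvRunA] at htail
        rw [htail, ← pvGroups_merge l i _ hl hi hs]
      · have hstep : pvStepA (out, l) i = (out ++ [l], i) := by
          simp [pvStepA, hi, hl, hs]
        simp only [pvRunA, List.foldl_cons, hstep]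
        have htail := ih (out ++ [l]) i hi
        simp only [pvRunA] at htail
        rw [htail, pvGroups_split l i _ hs]
        simp

theorem pvRunA_zero (x : List Int) : ∀ (out : List Int),
    pvRunA out 0 x =
      out ++ (let vals := (x.filter (fun v => decide (v ≠ 0))).dropWhile (fun v => decide (v < 0));
              if vals.isEmpty then [0] else pvGroups vals) := by
  induction x with
  | nil => intro out; simp [pvRunA]
  | cons i t ih =>
    intro out
    by_cases hi : i = 0
    · have hstep : pvStepA (out, 0) i = (out, 0) := by simp [pvStepA, hi]
      simp only [pvRunA, List.foldl_cons, hstep]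
      rw [List.filter_cons_of_neg (by simp [hi])]
      simpa [pvRunA] using ih out
    · rw [List.filter_cons_of_pos (by simp [hi])]
      by_cases hpos : i > 0
      · have hstep : pvStepA (out, 0) i = (out, i) := by simp [pvStepA, hi, hpos]
        simp only [pvRunA, List.foldl_cons, hstep]
        have htail := pvRunA_pos t out i hi
        simp only [pvRunA] at htail
        rw [htail]
        rw [List.dropWhile_cons_of_neg (by simp [not_lt.mpr (le_of_lt hpos)])]
        simp
      · have hstep : pvStepA (out, 0) i = (out, 0) := by simp [pvStepA, hi, hpos]
        simp only [pvRunA, List.foldl_cons, hstep]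
        rw [List.dropWhile_cons_of_pos (by simp; omega)]
        simpa [pvRunA] using ih out

-- ===== VERDICT (by name: the statement is the Claim_ definition above) =====
theorem gen_simplified_from_raw_spec : Claim_equal_gen_simplified_from_raw := by
  intro x _
  unfold Spec_gen_simplified_from_raw gen_simplified_from_raw gen_simplified_from_raw_alt
  have h := pvRunA_zero x []
  simp only [pvRunA, List.nil_append] at h
  exact h
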